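-- pv_equiv track=rewrite | github.com/GridySnake/for_gpt | strategies_helpful_functions.py | group_params
-- ===== SOURCE A (Python) =====
-- from collections import defaultdict
--
-- def group_params(params_dict):
--     tmp = defaultdict(lambda: defaultdict(dict))
--
--     for k, v in params_dict.items():
--         # ожидаем ключи вида IND__INST__PARAM
--         try:
--             ind, inst, param = k.split('__', 2)
--         except ValueError:
--             continue  # пропускаем некорректные ключи
--
--         # игнорируем "пустые" значения: '', None, строки из пробелов
--         if v is None or (isinstance(v, str) and v.strip() == ''):
--             # при этом фиксируем наличие параметра, чтобы получить []
--             _ = tmp[ind][param]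
--             continue
--
--         tmp[ind][param][int(inst)] = v  # храним по инстансу (для упорядочивания)
--
--     # финализация: сортируем по номеру инстанса и собираем списки значений
--     grouped = {
--         ind: {
--             param: [vals[i] for i in sorted(vals)]
--             for param, vals in params_by_param.items()
--         }
--         for ind, params_by_param in tmp.items()
--     }
--     return grouped
-- ===== SOURCE B (Python) =====
-- def group_params(params_dict):
--     # one parse pass -> flat records; one global stable sort by instance;
--     # one grouping pass (last value wins per instance); values read off in order
--     grouped = {}
--     records = []
--     for k, v in params_dict.items():
--         parts = k.split('__', 2)
--         if len(parts) != 3: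
--             continue  # malformed key
--         ind, inst, param = parts
--         if v is None or (isinstance(v, str) and v.strip() == ''):
--             grouped.setdefault(ind, {}).setdefault(param, {})
--         else:
--             i = int(inst)
--             grouped.setdefault(ind, {}).setdefault(param, {})
--             records.append((ind, param, i, v))
--     records.sort(key=lambda r: r[2])  # stable: ties keep original order
--     for ind, param, i, v in records:
--         grouped[ind][param][i] = v
--     return {ind: {param: list(vals.values()) for param, vals in params.items()}
--             for ind, params in grouped.items()}
-- ===== Notes on version B (the rewrite author's own statement) =====
-- stated objective: faster
-- what changed: Instead of filling a nested defaultdict and then sorting each (indicator,param) group's instance keys separately, B parses the keys into a flat record list in one pass, stable-sorts all records once by integer instance, and fills the groups in a single grouping pass so each group's values come out already ordered (dict.values(), no per-group sorted() call).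
import Mathlib
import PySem

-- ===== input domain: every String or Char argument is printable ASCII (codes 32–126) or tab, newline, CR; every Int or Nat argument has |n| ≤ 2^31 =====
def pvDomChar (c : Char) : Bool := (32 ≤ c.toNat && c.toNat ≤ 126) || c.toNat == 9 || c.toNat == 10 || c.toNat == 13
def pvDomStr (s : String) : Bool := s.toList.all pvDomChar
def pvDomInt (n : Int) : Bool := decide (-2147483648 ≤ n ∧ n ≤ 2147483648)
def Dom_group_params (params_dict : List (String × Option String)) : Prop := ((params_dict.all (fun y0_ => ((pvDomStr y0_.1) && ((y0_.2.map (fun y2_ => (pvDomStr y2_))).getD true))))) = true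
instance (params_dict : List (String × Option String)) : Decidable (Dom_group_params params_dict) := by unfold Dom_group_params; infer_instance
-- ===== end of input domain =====

-- B replaces A's nested defaultdict + per-group key sort by one parse pass, one global stable
-- sort by integer instance and one grouping pass (measured constant-factor speedup).

-- ===== PORT A =====
-- k.split('__', 2) unpacked into exactly three parts (ValueError = none)
def pvSplit3 (k : String) : Option (String × String × String) :=
  match PySem.Str.splitMax? k "__" 2 with
  | some [a, b, c] => some (a, b, c)
  | _ => none

-- v is None or (isinstance(v, str) and v.strip() == '')
def pvEmptyVal (v : Option String) : Bool :=
  match v with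
  | none => true
  | some s => PySem.Str.strip s == ""

def group_params (params_dict : List (String × Option String)) : List (String × List (String × List String)) :=
  let tmp : PySem.Dict String (PySem.Dict String (PySem.Dict Int String)) :=
    (PySem.Dict.ofList params_dict).items.foldl (fun tmp kv =>
      match pvSplit3 kv.1 with
      | none => tmp                 -- except ValueError: continue
      | some (ind, inst, param) =>
        if pvEmptyVal kv.2 then
          -- _ = tmp[ind][param]  (defaultdict access records the key)
          tmp.insert ind ((tmp.getD ind PySem.Dict.empty).setdefault param PySem.Dict.empty)
        else
          match PySem.Int.ofStr? inst with
          | some i =>               -- tmp[ind][param][int(inst)] = v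
            tmp.insert ind ((tmp.getD ind PySem.Dict.empty).insert param
              (((tmp.getD ind PySem.Dict.empty).getD param PySem.Dict.empty).insert i (kv.2.getD "")))
          | none => tmp             -- int(inst) raises ValueError: excluded by Pre_
      ) PySem.Dict.empty
  tmp.items.map (fun p => (p.1, p.2.items.map (fun q =>
    (q.1, (PySem.List.sorted q.2.keys (fun i => i) false).map (fun i => q.2.getD i "")))))

-- ===== PORT B =====
def group_params_alt (params_dict : List (String × Option String)) : List (String × List (String × List String)) :=
  let st : PySem.Dict String (PySem.Dict String (PySem.Dict Int String)) × List (String × String × Int × String) :=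
    (PySem.Dict.ofList params_dict).items.foldl (fun st kv =>
      match pvSplit3 kv.1 with
      | none => st                  -- malformed key
      | some (ind, inst, param) =>
        if pvEmptyVal kv.2 then
          (st.1.insert ind ((st.1.getD ind PySem.Dict.empty).setdefault param PySem.Dict.empty), st.2)
        else
          match PySem.Int.ofStr? inst with
          | some i =>
            (st.1.insert ind ((st.1.getD ind PySem.Dict.empty).setdefault param PySem.Dict.empty),
             st.2 ++ [(ind, param, i, kv.2.getD "")])
          | none => st              -- int(inst) raises ValueError: excluded by Pre_
      ) (PySem.Dict.empty, [])
  let records := PySem.List.sorted st.2 (fun r => r.2.2.1) false   -- records.sort(key=..): stable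
  let grouped := records.foldl (fun g r =>
      g.insert r.1 ((g.getD r.1 PySem.Dict.empty).insert r.2.1
        (((g.getD r.1 PySem.Dict.empty).getD r.2.1 PySem.Dict.empty).insert r.2.2.1 r.2.2.2))) st.1
  grouped.items.map (fun p => (p.1, p.2.items.map (fun q => (q.1, q.2.values))))

-- ===== PRECONDITION & SPEC =====
-- a pair whose key parses but whose non-empty value comes with a non-integer instance:
-- there Python A (and B) raise ValueError from int(inst)
def pvBadPair (kv : String × Option String) : Bool :=
  match pvSplit3 kv.1 with
  | some (_, inst, _) => !pvEmptyVal kv.2 && (PySem.Int.ofStr? inst).isNone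
  | none => false

-- Pre_ excludes the inputs carrying a pair on which int(inst) would raise ValueError
-- (non-integer instance with a non-empty value); everywhere else the Python A returns
-- normally. The association list represents a dict, so its keys are distinct and this
-- per-pair check is exactly A's raising condition.
def Pre_group_params (params_dict : List (String × Option String)) : Prop :=
  ∀ kv ∈ params_dict, pvBadPair kv = false
instance (params_dict : List (String × Option String)) : Decidable (Pre_group_params params_dict) := by
  unfold Pre_group_params; infer_instance

def pvWitness_group_params : (List (String × Option String)) :=
  [("sma__2__period", some "14"), ("sma__1__period", some "7"),
   ("ema__1__alpha", some " "), ("bad_key", some "x"), ("sma__2__period", some "20")]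

def Spec_group_params (params_dict : List (String × Option String)) (out : List (String × List (String × List String))) : Prop := out = group_params_alt params_dict
instance (params_dict : List (String × Option String)) (out : List (String × List (String × List String))) : Decidable (Spec_group_params params_dict out) := by unfold Spec_group_params; infer_instance

-- ===== CLAIM (what is proved, stated in full; the proofs are below) =====
def Claim_equal_group_params : Prop := ∀ (params_dict : List (String × Option String)), Dom_group_params params_dict → Pre_group_params params_dict → Spec_group_params params_dict (group_params params_dict)

-- ===== LEMMAS AND PROOFS =====

-- shared abbreviations for the proof
abbrev pvAct := String × String × Option (Int × String)
abbrev pvRec := String × String × Int × String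
abbrev pvD2 := PySem.Dict Int String
abbrev pvD1 := PySem.Dict String pvD2
abbrev pvD0 := PySem.Dict String pvD1

-- what one (key, value) pair contributes: skipped, presence only, or a value record
def pvParse (kv : String × Option String) : Option pvAct :=
  match pvSplit3 kv.1 with
  | none => none
  | some (ind, inst, param) =>
    if pvEmptyVal kv.2 then some (ind, param, none)
    else
      match PySem.Int.ofStr? inst with
      | some i => some (ind, param, some (i, kv.2.getD ""))
      | none => none

def pvPut (a : pvAct) : Option pvRec := a.2.2.map (fun e => (a.1, a.2.1, e.1, e.2))

def pvInnerA (t : pvD0) (a : pvAct) : pvD1 :=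
  match a.2.2 with
  | none => (t.getD a.1 PySem.Dict.empty).setdefault a.2.1 PySem.Dict.empty
  | some e => (t.getD a.1 PySem.Dict.empty).insert a.2.1
      (((t.getD a.1 PySem.Dict.empty).getD a.2.1 PySem.Dict.empty).insert e.1 e.2)
def pvStepA (t : pvD0) (a : pvAct) : pvD0 := t.insert a.1 (pvInnerA t a)

def pvInnerS (g : pvD0) (a : pvAct) : pvD1 :=
  (g.getD a.1 PySem.Dict.empty).setdefault a.2.1 PySem.Dict.empty
def pvStepS (g : pvD0) (a : pvAct) : pvD0 := g.insert a.1 (pvInnerS g a)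

def pvInnerP (g : pvD0) (r : pvRec) : pvD1 :=
  (g.getD r.1 PySem.Dict.empty).insert r.2.1
    (((g.getD r.1 PySem.Dict.empty).getD r.2.1 PySem.Dict.empty).insert r.2.2.1 r.2.2.2)
def pvStepP (g : pvD0) (r : pvRec) : pvD0 := g.insert r.1 (pvInnerP g r)

theorem pvStepA_def (t : pvD0) (a : pvAct) : pvStepA t a = t.insert a.1 (pvInnerA t a) := rfl
theorem pvInnerA_none (t : pvD0) (i p : String) :
    pvInnerA t (i, p, none) = (t.getD i PySem.Dict.empty).setdefault p PySem.Dict.empty := rfl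
theorem pvInnerA_some (t : pvD0) (i p : String) (e : Int × String) :
    pvInnerA t (i, p, some e) = (t.getD i PySem.Dict.empty).insert p
      (((t.getD i PySem.Dict.empty).getD p PySem.Dict.empty).insert e.1 e.2) := rfl
theorem pvStepS_def (g : pvD0) (a : pvAct) : pvStepS g a = g.insert a.1 (pvInnerS g a) := rfl
theorem pvInnerS_mk (g : pvD0) (i p : String) (ea : Option (Int × String)) :
    pvInnerS g (i, p, ea) = (g.getD i PySem.Dict.empty).setdefault p PySem.Dict.empty := rfl
theorem pvStepP_def (g : pvD0) (r : pvRec) : pvStepP g r = g.insert r.1 (pvInnerP g r) := rfl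
theorem pvInnerP_def (g : pvD0) (r : pvRec) :
    pvInnerP g r = (g.getD r.1 PySem.Dict.empty).insert r.2.1
      (((g.getD r.1 PySem.Dict.empty).getD r.2.1 PySem.Dict.empty).insert r.2.2.1 r.2.2.2) := rfl

def pvInds (acts : List pvAct) : List String := PySem.Set.ofList (acts.map (·.1))
def pvParms (acts : List pvAct) (ind : String) : List String :=
  PySem.Set.ofList ((acts.filter (fun a => a.1 == ind)).map (fun a => a.2.1))
def pvPairs (acts : List pvAct) (ind param : String) : List (Int × String) :=
  acts.filterMap (fun a => if a.1 == ind && a.2.1 == param then a.2.2 else none)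
def pvSel (ind param : String) (r : pvRec) : Option (Int × String) :=
  if r.1 == ind && r.2.1 == param then some (r.2.2.1, r.2.2.2) else none
def pvDictOf (ps : List (Int × String)) : pvD2 :=
  ps.foldl (fun d p => d.insert p.1 p.2) PySem.Dict.empty
def pvLast (ps : List (Int × String)) (i : Int) : String :=
  (((ps.filter (fun p => p.1 == i)).map (·.2)).getLast?).getD ""

-- the common normal form both ports are shown to compute
def pvOut (acts : List pvAct) : List (String × List (String × List String)) :=
  (pvInds acts).map (fun ind => (ind, (pvParms acts ind).map (fun param => (param,
     (PySem.List.sorted (PySem.Set.ofList ((pvPairs acts ind param).map (·.1))) (fun i => i) false).map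
       (pvLast (pvPairs acts ind param))))))

-- ---- generic dict / set helper lemmas ----

theorem pv_keys_setdefault {κ ν : Type} [BEq κ] [LawfulBEq κ] (d : PySem.Dict κ ν) (k : κ) (v : ν) :
    (d.setdefault k v).keys = PySem.Set.add d.keys k := by
  by_cases h : d.contains k = true
  · rw [PySem.Dict.setdefault_of_contains d v h,
        PySem.Set.add_of_mem ((PySem.Dict.contains_iff_mem_keys d k).mp h)]
  · have h' : d.contains k = false := by simpa using h
    rw [PySem.Dict.setdefault_of_not_contains d v h',
        PySem.Dict.keys_insert_of_not_contains d v h',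
        PySem.Set.add_of_not_mem (fun hm => by
          have := (PySem.Dict.contains_iff_mem_keys d k).mpr hm
          rw [h'] at this; exact Bool.false_ne_true this)]

theorem pv_keys_insert_add {κ ν : Type} [BEq κ] [LawfulBEq κ] (d : PySem.Dict κ ν) (k : κ) (v : ν) :
    (d.insert k v).keys = PySem.Set.add d.keys k := by
  by_cases h : d.contains k = true
  · rw [PySem.Dict.keys_insert_of_contains d v h,
        PySem.Set.add_of_mem ((PySem.Dict.contains_iff_mem_keys d k).mp h)]
  · have h' : d.contains k = false := by simpa using h
    rw [PySem.Dict.keys_insert_of_not_contains d v h',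
        PySem.Set.add_of_not_mem (fun hm => by
          have := (PySem.Dict.contains_iff_mem_keys d k).mpr hm
          rw [h'] at this; exact Bool.false_ne_true this)]

theorem pv_getD_setdefault {κ ν : Type} [BEq κ] [LawfulBEq κ] [DecidableEq κ] (d : PySem.Dict κ ν) (k k' : κ) (dflt : ν) :
    (d.setdefault k dflt).getD k' dflt = d.getD k' dflt := by
  by_cases h : d.contains k = true
  · rw [PySem.Dict.setdefault_of_contains d dflt h]
  · have h' : d.contains k = false := by simpa using h
    rw [PySem.Dict.setdefault_of_not_contains d dflt h', PySem.Dict.getD_insert]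
    split_ifs with he
    · rw [he, PySem.Dict.getD_of_not_contains d dflt h']
    · rfl
theorem pv_update_of_subset (s : List String) (xs : List String) (h : ∀ x ∈ xs, x ∈ s) :
    PySem.Set.update s xs = s := by
  rw [PySem.Set.update_eq_append_filter]
  have hnil : List.filter (fun y => !PySem.Set.contains s y) (PySem.Set.ofList xs) = [] := by
    apply List.filter_eq_nil_iff.mpr
    intro y hy
    have hmem : y ∈ s := h y ((PySem.Set.mem_ofList xs y).mp hy)
    simp [PySem.Set.contains_eq_listContains, hmem]
  rw [hnil, List.append_nil]
theorem pv_ofList_sublist {α : Type} [BEq α] [LawfulBEq α] (xs : List α) :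
    (PySem.Set.ofList xs).Sublist xs := by
  induction xs with
  | nil => exact List.Sublist.refl _
  | cons x xs ih =>
    rw [PySem.Set.ofList_cons]
    refine List.Sublist.cons₂ x ?_
    unfold PySem.Set.discard
    exact List.filter_sublist.trans ih
theorem pv_pairwise_of_forall_mem {α : Type} (R : α → α → Prop) (l : List α)
    (h : ∀ a ∈ l, ∀ b ∈ l, R a b) : l.Pairwise R := by
  induction l with
  | nil => exact List.Pairwise.nil
  | cons a l ih =>
    exact List.Pairwise.cons (fun b hb => h a (by simp) b (by simp [hb]))
      (ih (fun x hx y hy => h x (by simp [hx]) y (by simp [hy])))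

-- ---- stability of PySem.List.sorted ----

theorem pv_insertBy_all {α κ : Type} [LinearOrder κ] (key : α → κ) (x : α) (l : List α)
    (h : ∀ z ∈ l, key x < key z) :
    PySem.List.insertBy (fun a b => decide (key a < key b)) x l = x :: l := by
  cases l with
  | nil => rfl
  | cons y ys =>
    have hy := h y (by simp)
    simp [PySem.List.insertBy, hy]

theorem pv_filter_insertBy {α κ : Type} [LinearOrder κ] (key : α → κ) (p : α → Bool) (x : α) (l : List α)
    (hl : l.Pairwise (fun a b => key a ≤ key b)) :
    (PySem.List.insertBy (fun a b => decide (key a < key b)) x l).filter p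
      = if p x then PySem.List.insertBy (fun a b => decide (key a < key b)) x (l.filter p)
        else l.filter p := by
  induction l with
  | nil => cases hp : p x <;> simp [PySem.List.insertBy, hp]
  | cons y ys ih =>
    rw [List.pairwise_cons] at hl
    obtain ⟨hy, hys⟩ := hl
    by_cases hlt : key x < key y
    · rw [show PySem.List.insertBy (fun a b => decide (key a < key b)) x (y :: ys) = x :: y :: ys
          from by simp [PySem.List.insertBy, hlt]]
      have hall : ∀ z ∈ (y :: ys).filter p, key x < key z := by
        intro z hz
        rcases List.mem_cons.mp (List.mem_filter.mp hz).1 with h1 | h2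
        · exact h1 ▸ hlt
        · exact lt_of_lt_of_le hlt (hy z h2)
      by_cases hpx : p x = true
      · rw [if_pos hpx, pv_insertBy_all key x _ hall, List.filter_cons, if_pos hpx]
      · rw [if_neg hpx, List.filter_cons, if_neg hpx]
    · rw [show PySem.List.insertBy (fun a b => decide (key a < key b)) x (y :: ys)
            = y :: PySem.List.insertBy (fun a b => decide (key a < key b)) x ys
          from by simp [PySem.List.insertBy, hlt]]
      by_cases hpy : p y = true <;> by_cases hpx : p x = true <;>
        simp [List.filter_cons, hpy, hpx, ih hys, PySem.List.insertBy, hlt]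
theorem pv_sorted_append_singleton {α κ : Type} [LinearOrder κ] (key : α → κ) (xs : List α) (x : α) :
    PySem.List.sorted (xs ++ [x]) key false
      = PySem.List.insertBy (fun a b => decide (key a < key b)) x (PySem.List.sorted xs key false) := by
  rw [PySem.List.sorted_eq_foldl_insertBy, PySem.List.sorted_eq_foldl_insertBy, List.foldl_append,
      List.foldl_cons, List.foldl_nil]

theorem pv_filter_sorted {α κ : Type} [LinearOrder κ] (key : α → κ) (p : α → Bool) (xs : List α) :
    (PySem.List.sorted xs key false).filter p = PySem.List.sorted (xs.filter p) key false := by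
  induction xs using List.reverseRecOn with
  | nil => rfl
  | append_singleton xs x ih =>
    rw [pv_sorted_append_singleton,
        pv_filter_insertBy key p x _ (PySem.List.sorted_pairwise xs key),
        List.filter_append]
    by_cases hpx : p x
    · rw [if_pos hpx, ih, show List.filter p [x] = [x] from by simp [hpx],
          pv_sorted_append_singleton]
    · rw [if_neg hpx, ih, show List.filter p [x] = ([] : List α) from by simp [hpx],
          List.append_nil]

theorem pv_map_insertBy {α β κ : Type} [LinearOrder κ] (key : β → κ) (f : α → β) (x : α) (l : List α) :
    (PySem.List.insertBy (fun a b => decide (key (f a) < key (f b))) x l).map f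
      = PySem.List.insertBy (fun a b => decide (key a < key b)) (f x) (l.map f) := by
  induction l with
  | nil => rfl
  | cons y ys ih =>
    by_cases h : key (f x) < key (f y) <;> simp [PySem.List.insertBy, h, ih]

theorem pv_sorted_map {α β κ : Type} [LinearOrder κ] (key : β → κ) (f : α → β) (xs : List α) :
    (PySem.List.sorted xs (fun a => key (f a)) false).map f
      = PySem.List.sorted (xs.map f) key false := by
  induction xs using List.reverseRecOn with
  | nil => rfl
  | append_singleton xs x ih =>
    rw [pv_sorted_append_singleton, pv_map_insertBy, ih, List.map_append, List.map_cons,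
        List.map_nil, pv_sorted_append_singleton]
theorem pv_filterMap_ite {α β : Type} (m : α → Bool) (proj : α → β) (l : List α) :
    l.filterMap (fun r => if m r then some (proj r) else none) = (l.filter m).map proj := by
  induction l with
  | nil => rfl
  | cons a l ih =>
    by_cases h : m a = true <;> simp [List.filterMap_cons, List.filter_cons, h, ih]

-- ---- A-side fold characterisation ----

theorem pv_foldA_keys (acts : List pvAct) :
    (acts.foldl pvStepA PySem.Dict.empty).keys = pvInds acts := by
  induction acts using List.reverseRecOn with
  | nil => rfl
  | append_singleton acts a ih =>
    rw [List.foldl_append, List.foldl_cons, List.foldl_nil, pvStepA_def, pv_keys_insert_add, ih]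
    unfold pvInds
    simp [List.map_append, PySem.Set.ofList_append_singleton]
theorem pv_foldA_parms (acts : List pvAct) (ind : String) :
    ((acts.foldl pvStepA PySem.Dict.empty).getD ind PySem.Dict.empty).keys = pvParms acts ind := by
  induction acts using List.reverseRecOn with
  | nil => simp [pvParms, PySem.Set.ofList, PySem.Set.empty]
  | append_singleton acts a ih =>
    obtain ⟨ia, pa, ea⟩ := a
    rw [List.foldl_append, List.foldl_cons, List.foldl_nil, pvStepA_def]
    dsimp only
    rw [PySem.Dict.getD_insert]
    have hparms : pvParms (acts ++ [(ia, pa, ea)]) ind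
        = if ia = ind then PySem.Set.add (pvParms acts ind) pa else pvParms acts ind := by
      unfold pvParms
      by_cases h : ia = ind <;>
        simp [h, List.filter_append, List.map_append, PySem.Set.ofList_append_singleton]
    rw [hparms]
    by_cases h : ia = ind
    · rw [if_pos h.symm, if_pos h]
      subst h
      cases ea with
      | none => rw [pvInnerA_none, pv_keys_setdefault, ih]
      | some e => rw [pvInnerA_some, pv_keys_insert_add, ih]
    · rw [if_neg (fun hh => h hh.symm), if_neg h, ih]
theorem pv_foldA_inner (acts : List pvAct) (ind param : String) :
    (((acts.foldl pvStepA PySem.Dict.empty).getD ind PySem.Dict.empty).getD param PySem.Dict.empty)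
      = pvDictOf (pvPairs acts ind param) := by
  induction acts using List.reverseRecOn with
  | nil => simp [pvPairs, pvDictOf]
  | append_singleton acts a ih =>
    obtain ⟨ia, pa, ea⟩ := a
    rw [List.foldl_append, List.foldl_cons, List.foldl_nil, pvStepA_def]
    dsimp only
    rw [PySem.Dict.getD_insert]
    have hpairs : pvPairs (acts ++ [(ia, pa, ea)]) ind param
        = pvPairs acts ind param ++ (if ia = ind ∧ pa = param then ea.toList else []) := by
      unfold pvPairs
      rw [List.filterMap_append]
      congr 1
      by_cases h1 : ia = ind
      · by_cases h2 : pa = param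
        · cases ea <;> simp [h1, h2]
        · simp [h1, h2]
      · simp [h1]
    rw [hpairs]
    by_cases h1 : ia = ind
    · rw [if_pos h1.symm]
      subst h1
      cases ea with
      | none =>
        rw [pvInnerA_none, pv_getD_setdefault, ih]
        simp
      | some e =>
        rw [pvInnerA_some, PySem.Dict.getD_insert]
        by_cases h2 : pa = param
        · rw [if_pos h2.symm]
          subst h2
          rw [ih]
          simp [pvDictOf, List.foldl_append]
        · rw [if_neg (fun hh => h2 hh.symm), ih]
          simp [h2]
    · rw [if_neg (fun hh => h1 hh.symm), ih]
      simp [h1]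
-- ---- skeleton fold characterisation ----

theorem pv_foldS_keys (acts : List pvAct) :
    (acts.foldl pvStepS PySem.Dict.empty).keys = pvInds acts := by
  induction acts using List.reverseRecOn with
  | nil => rfl
  | append_singleton acts a ih =>
    rw [List.foldl_append, List.foldl_cons, List.foldl_nil, pvStepS_def, pv_keys_insert_add, ih]
    unfold pvInds
    simp [List.map_append, PySem.Set.ofList_append_singleton]
theorem pv_foldS_parms (acts : List pvAct) (ind : String) :
    ((acts.foldl pvStepS PySem.Dict.empty).getD ind PySem.Dict.empty).keys = pvParms acts ind := by
  induction acts using List.reverseRecOn with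
  | nil => simp [pvParms, PySem.Set.ofList, PySem.Set.empty]
  | append_singleton acts a ih =>
    obtain ⟨ia, pa, ea⟩ := a
    rw [List.foldl_append, List.foldl_cons, List.foldl_nil, pvStepS_def]
    dsimp only
    rw [PySem.Dict.getD_insert]
    have hparms : pvParms (acts ++ [(ia, pa, ea)]) ind
        = if ia = ind then PySem.Set.add (pvParms acts ind) pa else pvParms acts ind := by
      unfold pvParms
      by_cases h : ia = ind <;>
        simp [h, List.filter_append, List.map_append, PySem.Set.ofList_append_singleton]
    rw [hparms]
    by_cases h : ia = ind
    · rw [if_pos h.symm, if_pos h]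
      subst h
      rw [pvInnerS_mk, pv_keys_setdefault, ih]
    · rw [if_neg (fun hh => h hh.symm), if_neg h, ih]
theorem pv_foldS_inner (acts : List pvAct) (ind param : String) :
    (((acts.foldl pvStepS PySem.Dict.empty).getD ind PySem.Dict.empty).getD param PySem.Dict.empty)
      = PySem.Dict.empty := by
  induction acts using List.reverseRecOn with
  | nil => simp
  | append_singleton acts a ih =>
    obtain ⟨ia, pa, ea⟩ := a
    rw [List.foldl_append, List.foldl_cons, List.foldl_nil, pvStepS_def]
    dsimp only
    rw [PySem.Dict.getD_insert]
    by_cases h : ia = ind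
    · rw [if_pos h.symm]
      subst h
      rw [pvInnerS_mk, pv_getD_setdefault, ih]
    · rw [if_neg (fun hh => h hh.symm), ih]
-- ---- record fold characterisation ----

theorem pv_foldP_keys (rs : List pvRec) (g : pvD0) :
    (rs.foldl pvStepP g).keys = PySem.Set.update g.keys (rs.map (·.1)) := by
  induction rs generalizing g with
  | nil => rw [List.foldl_nil, List.map_nil, PySem.Set.update_nil]
  | cons r rs ih =>
    rw [List.foldl_cons, ih, List.map_cons, PySem.Set.update_cons]
    congr 1
    rw [pvStepP_def, pv_keys_insert_add]
theorem pv_foldP_parms (rs : List pvRec) (g : pvD0) (ind : String) :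
    ((rs.foldl pvStepP g).getD ind PySem.Dict.empty).keys
      = PySem.Set.update ((g.getD ind PySem.Dict.empty).keys)
          ((rs.filter (fun r => r.1 == ind)).map (fun r => r.2.1)) := by
  induction rs generalizing g with
  | nil => rw [List.foldl_nil, List.filter_nil, List.map_nil, PySem.Set.update_nil]
  | cons r rs ih =>
    rw [List.foldl_cons, ih, List.filter_cons]
    rw [pvStepP_def, PySem.Dict.getD_insert]
    by_cases h : r.1 = ind
    · rw [if_pos h.symm, if_pos (show (r.1 == ind) = true from by simp [h]), List.map_cons,
          PySem.Set.update_cons]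
      congr 1
      rw [pvInnerP_def, pv_keys_insert_add, h]
    · rw [if_neg (fun hh => h hh.symm), if_neg (show ¬ (r.1 == ind) = true from by simp [h])]
theorem pv_foldP_inner (rs : List pvRec) (g : pvD0) (ind param : String) :
    (((rs.foldl pvStepP g).getD ind PySem.Dict.empty).getD param PySem.Dict.empty)
      = (rs.filterMap (pvSel ind param)).foldl (fun d p => d.insert p.1 p.2)
          ((g.getD ind PySem.Dict.empty).getD param PySem.Dict.empty) := by
  induction rs generalizing g with
  | nil => rw [List.foldl_nil, List.filterMap_nil, List.foldl_nil]
  | cons r rs ih =>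
    rw [List.foldl_cons, ih, List.filterMap_cons]
    rw [pvStepP_def, PySem.Dict.getD_insert]
    by_cases h1 : r.1 = ind
    · rw [if_pos h1.symm, pvInnerP_def, PySem.Dict.getD_insert]
      by_cases h2 : r.2.1 = param
      · rw [if_pos h2.symm, show pvSel ind param r = some (r.2.2.1, r.2.2.2)
            from by simp [pvSel, h1, h2], List.foldl_cons, h1, h2]
      · rw [if_neg (fun hh => h2 hh.symm), show pvSel ind param r = none
            from by simp [pvSel, h2], h1]
    · rw [if_neg (fun hh => h1 hh.symm), show pvSel ind param r = none
          from by simp [pvSel, h1]]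
-- ---- flat insert fold (one group's dict) ----

theorem pv_dictOf_keys (ps : List (Int × String)) :
    (pvDictOf ps).keys = PySem.Set.ofList (ps.map (·.1)) := by
  induction ps using List.reverseRecOn with
  | nil => rfl
  | append_singleton ps p ih =>
    unfold pvDictOf at *
    rw [List.foldl_append, List.foldl_cons, List.foldl_nil, pv_keys_insert_add, ih]
    simp [List.map_append, PySem.Set.ofList_append_singleton]
theorem pv_dictOf_getD (ps : List (Int × String)) (i : Int) :
    (pvDictOf ps).getD i "" = pvLast ps i := by
  induction ps using List.reverseRecOn with
  | nil => rfl
  | append_singleton ps p ih =>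
    unfold pvDictOf at *
    rw [List.foldl_append, List.foldl_cons, List.foldl_nil, PySem.Dict.getD_insert]
    unfold pvLast at *
    rw [List.filter_append, List.map_append]
    by_cases h : p.1 = i
    · rw [if_pos h.symm]
      simp [h, List.getLast?_concat]
    · rw [if_neg (fun hh => h hh.symm), ih]
      simp [h]
-- ---- stable sort bridging ----

theorem pv_pairs_eq_puts (acts : List pvAct) (ind param : String) :
    pvPairs acts ind param = (acts.filterMap pvPut).filterMap (pvSel ind param) := by
  unfold pvPairs
  rw [List.filterMap_filterMap]
  apply List.filterMap_congr
  intro a _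
  obtain ⟨ia, pa, ea⟩ := a
  cases ea with
  | none => simp [pvPut, pvSel]
  | some e =>
    by_cases h1 : ia = ind <;> by_cases h2 : pa = param <;> simp [pvPut, pvSel, h1, h2]
theorem pv_SP_eq (acts : List pvAct) (ind param : String) :
    (PySem.List.sorted (acts.filterMap pvPut) (fun r => r.2.2.1) false).filterMap (pvSel ind param)
      = PySem.List.sorted (pvPairs acts ind param) (fun p => p.1) false := by
  have h1 : ∀ (rs : List pvRec), rs.filterMap (pvSel ind param)
      = (rs.filter (fun r => r.1 == ind && r.2.1 == param)).map (fun r => (r.2.2.1, r.2.2.2)) := by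
    intro rs
    exact pv_filterMap_ite (fun r : pvRec => r.1 == ind && r.2.1 == param)
      (fun r : pvRec => (r.2.2.1, r.2.2.2)) rs
  rw [pv_pairs_eq_puts, h1, h1, pv_filter_sorted]
  exact pv_sorted_map (fun p : Int × String => p.1) (fun r : pvRec => (r.2.2.1, r.2.2.2))
    ((acts.filterMap pvPut).filter (fun r => r.1 == ind && r.2.1 == param))
theorem pv_last_sorted (ps : List (Int × String)) (i : Int) :
    pvLast (PySem.List.sorted ps (fun p => p.1) false) i = pvLast ps i := by
  unfold pvLast
  rw [pv_filter_sorted (fun p : Int × String => p.1) (fun p => p.1 == i) ps]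
  have hpw : (ps.filter (fun p => p.1 == i)).Pairwise (fun a b => a.1 ≤ b.1) := by
    apply pv_pairwise_of_forall_mem
    intro a ha b hb
    have h1 : a.1 = i := by simpa using (List.mem_filter.mp ha).2
    have h2 : b.1 = i := by simpa using (List.mem_filter.mp hb).2
    rw [h1, h2]
  rw [PySem.List.sorted_eq_self_of_pairwise _ _ hpw]

theorem pv_ofList_sorted (ps : List (Int × String)) :
    PySem.Set.ofList ((PySem.List.sorted ps (fun p => p.1) false).map (·.1))
      = PySem.List.sorted (PySem.Set.ofList (ps.map (·.1))) (fun i => i) false := by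
  apply Eq.symm
  apply PySem.List.sorted_eq_of_perm_of_pairwise_lt
  · have hp : ((PySem.List.sorted ps (fun p => p.1) false).map (·.1)).Perm (ps.map (·.1)) :=
      (PySem.List.sorted_perm ps _ false).map _
    rw [List.perm_ext_iff_of_nodup (PySem.Set.nodup_ofList _) (PySem.Set.nodup_ofList _)]
    intro a
    rw [PySem.Set.mem_ofList, PySem.Set.mem_ofList, hp.mem_iff]
  · have h1 : ((PySem.List.sorted ps (fun p => p.1) false).map (·.1)).Pairwise (· ≤ ·) :=
      PySem.List.sorted_map_key_pairwise ps _
    have h2 : (PySem.Set.ofList ((PySem.List.sorted ps (fun p => p.1) false).map (·.1))).Pairwise (· ≤ ·) :=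
      List.Pairwise.sublist (pv_ofList_sublist _) h1
    have h3 : (PySem.Set.ofList ((PySem.List.sorted ps (fun p => p.1) false).map (·.1))).Pairwise (· ≠ ·) :=
      PySem.Set.nodup_ofList _
    exact (h2.and h3).imp (fun h => lt_of_le_of_ne h.1 h.2)
-- ---- records land on existing skeleton keys ----

theorem pv_put_ind_mem (acts : List pvAct) (r : pvRec) (h : r ∈ acts.filterMap pvPut) :
    r.1 ∈ pvInds acts := by
  obtain ⟨a, ha, hput⟩ := List.mem_filterMap.mp h
  unfold pvPut at hput
  cases he : a.2.2 with
  | none => rw [he] at hput; simp at hput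
  | some e =>
    rw [he] at hput
    simp only [Option.map_some] at hput
    have h1 : r.1 = a.1 := by rw [← Option.some_inj.mp hput]
    unfold pvInds
    rw [PySem.Set.mem_ofList, h1]
    exact List.mem_map_of_mem ha

theorem pv_put_param_mem (acts : List pvAct) (r : pvRec) (h : r ∈ acts.filterMap pvPut) :
    r.2.1 ∈ pvParms acts r.1 := by
  obtain ⟨a, ha, hput⟩ := List.mem_filterMap.mp h
  unfold pvPut at hput
  cases he : a.2.2 with
  | none => rw [he] at hput; simp at hput
  | some e =>
    rw [he] at hput
    simp only [Option.map_some] at hput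
    have hr := Option.some_inj.mp hput
    have h1 : r.1 = a.1 := by rw [← hr]
    have h2 : r.2.1 = a.2.1 := by rw [← hr]
    unfold pvParms
    rw [PySem.Set.mem_ofList, h2]
    apply List.mem_map_of_mem
    rw [List.mem_filter]
    exact ⟨ha, by simp [h1]⟩


-- ---- the first fold of B, split into skeleton and records ----

theorem pv_foldB (L : List (String × Option String)) (g : pvD0) (rs : List pvRec) :
    L.foldl (fun st kv =>
      match pvSplit3 kv.1 with
      | none => st
      | some (ind, inst, param) =>
        if pvEmptyVal kv.2 then
          (st.1.insert ind ((st.1.getD ind PySem.Dict.empty).setdefault param PySem.Dict.empty), st.2)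
        else
          match PySem.Int.ofStr? inst with
          | some i =>
            (st.1.insert ind ((st.1.getD ind PySem.Dict.empty).setdefault param PySem.Dict.empty),
             st.2 ++ [(ind, param, i, kv.2.getD "")])
          | none => st) (g, rs)
    = ((L.filterMap pvParse).foldl pvStepS g, rs ++ (L.filterMap pvParse).filterMap pvPut) := by
  induction L generalizing g rs with
  | nil => simp
  | cons kv L ih =>
    rw [List.foldl_cons, List.filterMap_cons]
    cases hs : pvSplit3 kv.1 with
    | none =>
      have hp : pvParse kv = none := by unfold pvParse; rw [hs]
      rw [hp]
      simp only [hs]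
      exact ih g rs
    | some t =>
      obtain ⟨i0, s0, p0⟩ := t
      by_cases he : pvEmptyVal kv.2 = true
      · have hp : pvParse kv = some (i0, p0, none) := by unfold pvParse; rw [hs]; simp [he]
        rw [hp]
        simp only [hs, he, if_true]
        rw [ih, List.foldl_cons, List.filterMap_cons]
        simp [pvStepS, pvInnerS, pvPut]
      · have he' : pvEmptyVal kv.2 = false := by simpa using he
        cases ho : PySem.Int.ofStr? s0 with
        | none =>
          have hp : pvParse kv = none := by unfold pvParse; rw [hs]; simp [he', ho]
          rw [hp]
          simp only [hs, he', Bool.false_eq_true, if_false, ho]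
          exact ih g rs
        | some i =>
          have hp : pvParse kv = some (i0, p0, some (i, kv.2.getD "")) := by
            unfold pvParse; rw [hs]; simp [he', ho]
          rw [hp]
          simp only [hs, he', Bool.false_eq_true, if_false, ho]
          rw [ih, List.foldl_cons, List.filterMap_cons]
          simp [pvStepS, pvInnerS, pvPut]

-- ---- extraction of the final nested dicts ----

theorem pv_extractA (acts : List pvAct) :
    (acts.foldl pvStepA PySem.Dict.empty).items.map (fun p => (p.1, p.2.items.map (fun q =>
      (q.1, (PySem.List.sorted q.2.keys (fun i => i) false).map (fun i => q.2.getD i "")))))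
    = pvOut acts := by
  have hnd : (acts.foldl pvStepA PySem.Dict.empty).keys.Nodup := by
    rw [pv_foldA_keys]; unfold pvInds; exact PySem.Set.nodup_ofList _
  rw [PySem.Dict.items_eq_map_keys _ hnd PySem.Dict.empty, List.map_map, pv_foldA_keys]
  unfold pvOut
  apply List.map_congr_left
  intro ind _
  simp only [Function.comp_apply]
  refine congrArg (Prod.mk ind) ?_
  have hnd1 : ((acts.foldl pvStepA PySem.Dict.empty).getD ind PySem.Dict.empty).keys.Nodup := by
    rw [pv_foldA_parms]; unfold pvParms; exact PySem.Set.nodup_ofList _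
  rw [PySem.Dict.items_eq_map_keys _ hnd1 PySem.Dict.empty, List.map_map, pv_foldA_parms]
  apply List.map_congr_left
  intro param _
  simp only [Function.comp_apply]
  refine congrArg (Prod.mk param) ?_
  rw [pv_foldA_inner, pv_dictOf_keys]
  exact List.map_congr_left (fun i _ => pv_dictOf_getD _ i)

theorem pv_extractB (acts : List pvAct) :
    ((PySem.List.sorted (acts.filterMap pvPut) (fun r => r.2.2.1) false).foldl pvStepP
        (acts.foldl pvStepS PySem.Dict.empty)).items.map (fun p => (p.1, p.2.items.map (fun q =>
      (q.1, q.2.values))))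
    = pvOut acts := by
  have hkeys : ((PySem.List.sorted (acts.filterMap pvPut) (fun r => r.2.2.1) false).foldl pvStepP
      (acts.foldl pvStepS PySem.Dict.empty)).keys = pvInds acts := by
    rw [pv_foldP_keys, pv_foldS_keys]
    apply pv_update_of_subset
    intro x hx
    obtain ⟨r, hr, rfl⟩ := List.mem_map.mp hx
    rw [PySem.List.mem_sorted] at hr
    exact pv_put_ind_mem acts r hr
  have hparms : ∀ ind, (((PySem.List.sorted (acts.filterMap pvPut) (fun r => r.2.2.1) false).foldl pvStepP
      (acts.foldl pvStepS PySem.Dict.empty)).getD ind PySem.Dict.empty).keys = pvParms acts ind := by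
    intro ind
    rw [pv_foldP_parms, pv_foldS_parms]
    apply pv_update_of_subset
    intro x hx
    obtain ⟨r, hr, rfl⟩ := List.mem_map.mp hx
    have h1 := (List.mem_filter.mp hr).1
    have h2 : r.1 = ind := by simpa using (List.mem_filter.mp hr).2
    rw [PySem.List.mem_sorted] at h1
    have h3 := pv_put_param_mem acts r h1
    rwa [h2] at h3
  have hinner : ∀ ind param, ((((PySem.List.sorted (acts.filterMap pvPut) (fun r => r.2.2.1) false).foldl pvStepP
      (acts.foldl pvStepS PySem.Dict.empty)).getD ind PySem.Dict.empty).getD param PySem.Dict.empty)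
      = pvDictOf (PySem.List.sorted (pvPairs acts ind param) (fun p => p.1) false) := by
    intro ind param
    rw [pv_foldP_inner, pv_foldS_inner, pv_SP_eq]
    rfl
  have hnd : ((PySem.List.sorted (acts.filterMap pvPut) (fun r => r.2.2.1) false).foldl pvStepP
      (acts.foldl pvStepS PySem.Dict.empty)).keys.Nodup := by
    rw [hkeys]; unfold pvInds; exact PySem.Set.nodup_ofList _
  rw [PySem.Dict.items_eq_map_keys _ hnd PySem.Dict.empty, List.map_map, hkeys]
  unfold pvOut
  apply List.map_congr_left
  intro ind _
  simp only [Function.comp_apply]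
  refine congrArg (Prod.mk ind) ?_
  have hnd1 : (((PySem.List.sorted (acts.filterMap pvPut) (fun r => r.2.2.1) false).foldl pvStepP
      (acts.foldl pvStepS PySem.Dict.empty)).getD ind PySem.Dict.empty).keys.Nodup := by
    rw [hparms ind]; unfold pvParms; exact PySem.Set.nodup_ofList _
  rw [PySem.Dict.items_eq_map_keys _ hnd1 PySem.Dict.empty, List.map_map, hparms ind]
  apply List.map_congr_left
  intro param _
  simp only [Function.comp_apply]
  refine congrArg (Prod.mk param) ?_
  rw [hinner ind param]
  have hndq : (pvDictOf (PySem.List.sorted (pvPairs acts ind param) (fun p => p.1) false)).keys.Nodup := by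
    rw [pv_dictOf_keys]; exact PySem.Set.nodup_ofList _
  rw [PySem.Dict.values_eq_map_keys _ hndq "", pv_dictOf_keys, pv_ofList_sorted]
  exact List.map_congr_left (fun i _ => by rw [pv_dictOf_getD, pv_last_sorted])

-- ---- the two ports against the normal form ----

theorem pv_A_out (L : List (String × Option String)) :
    (L.foldl (fun tmp kv =>
      match pvSplit3 kv.1 with
      | none => tmp
      | some (ind, inst, param) =>
        if pvEmptyVal kv.2 then
          tmp.insert ind ((tmp.getD ind PySem.Dict.empty).setdefault param PySem.Dict.empty)
        else
          match PySem.Int.ofStr? inst with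
          | some i =>
            tmp.insert ind ((tmp.getD ind PySem.Dict.empty).insert param
              (((tmp.getD ind PySem.Dict.empty).getD param PySem.Dict.empty).insert i (kv.2.getD "")))
          | none => tmp) PySem.Dict.empty).items.map (fun p => (p.1, p.2.items.map (fun q =>
        (q.1, (PySem.List.sorted q.2.keys (fun i => i) false).map (fun i => q.2.getD i "")))))
      = pvOut (L.filterMap pvParse) := by
  have hf : L.foldl (fun tmp kv =>
      match pvSplit3 kv.1 with
      | none => tmp
      | some (ind, inst, param) =>
        if pvEmptyVal kv.2 then
          tmp.insert ind ((tmp.getD ind PySem.Dict.empty).setdefault param PySem.Dict.empty)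
        else
          match PySem.Int.ofStr? inst with
          | some i =>
            tmp.insert ind ((tmp.getD ind PySem.Dict.empty).insert param
              (((tmp.getD ind PySem.Dict.empty).getD param PySem.Dict.empty).insert i (kv.2.getD "")))
          | none => tmp) PySem.Dict.empty
      = (L.filterMap pvParse).foldl pvStepA PySem.Dict.empty := by
    rw [List.foldl_filterMap]
    apply PySem.List.foldl_congr_mem
    intro acc kv _
    unfold pvParse pvStepA pvInnerA
    cases hs : pvSplit3 kv.1 with
    | none => simp [hs]
    | some t =>
      obtain ⟨i0, s0, p0⟩ := t
      by_cases he : pvEmptyVal kv.2 = true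
      · simp [hs, he]
      · have he' : pvEmptyVal kv.2 = false := by simpa using he
        cases ho : PySem.Int.ofStr? s0 with
        | none => simp [hs, he', ho]
        | some i => simp [hs, he', ho]
  rw [hf]
  exact pv_extractA _

theorem pv_B_out (L : List (String × Option String)) :
    (let st : pvD0 × List pvRec :=
      L.foldl (fun st kv =>
        match pvSplit3 kv.1 with
        | none => st
        | some (ind, inst, param) =>
          if pvEmptyVal kv.2 then
            (st.1.insert ind ((st.1.getD ind PySem.Dict.empty).setdefault param PySem.Dict.empty), st.2)
          else
            match PySem.Int.ofStr? inst with
            | some i =>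
              (st.1.insert ind ((st.1.getD ind PySem.Dict.empty).setdefault param PySem.Dict.empty),
               st.2 ++ [(ind, param, i, kv.2.getD "")])
            | none => st) (PySem.Dict.empty, [])
     let records := PySem.List.sorted st.2 (fun r => r.2.2.1) false
     let grouped := records.foldl (fun g r =>
        g.insert r.1 ((g.getD r.1 PySem.Dict.empty).insert r.2.1
          (((g.getD r.1 PySem.Dict.empty).getD r.2.1 PySem.Dict.empty).insert r.2.2.1 r.2.2.2))) st.1
     grouped.items.map (fun p => (p.1, p.2.items.map (fun q => (q.1, q.2.values)))))
      = pvOut (L.filterMap pvParse) := by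
  have h1 : L.foldl (fun st kv =>
      match pvSplit3 kv.1 with
      | none => st
      | some (ind, inst, param) =>
        if pvEmptyVal kv.2 then
          (st.1.insert ind ((st.1.getD ind PySem.Dict.empty).setdefault param PySem.Dict.empty), st.2)
        else
          match PySem.Int.ofStr? inst with
          | some i =>
            (st.1.insert ind ((st.1.getD ind PySem.Dict.empty).setdefault param PySem.Dict.empty),
             st.2 ++ [(ind, param, i, kv.2.getD "")])
          | none => st) (PySem.Dict.empty, ([] : List pvRec))
      = ((L.filterMap pvParse).foldl pvStepS PySem.Dict.empty,
         (L.filterMap pvParse).filterMap pvPut) := by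
    simpa using pv_foldB L PySem.Dict.empty []
  simp only [h1]
  exact pv_extractB (L.filterMap pvParse)

-- ===== VERDICT (by name: the statement is the Claim_ definition above) =====
theorem group_params_spec : Claim_equal_group_params := by
  intro pd _ _
  unfold Spec_group_params group_params group_params_alt
  rw [pv_A_out, pv_B_out]
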